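-- pv_equiv track=rewrite | github.com/lazygophers/roo | app/core/rules_service.py | get_search_directories
-- ===== SOURCE A (Python) =====
-- from typing import List, Dict, Any, Optional, Tuple
--
-- def get_search_directories(slug: str) -> List[str]:
--     """根据 slug 生成搜索目录列表"""
--     search_dirs = []
--
--     # 规则：slug = code-go -> [rules-code-go, rules-code, rules]
--     if '-' in slug:
--         parts = slug.split('-')
--         # 逐步构建目录名
--         for i in range(len(parts), 0, -1):
--             dir_name = 'rules-' + '-'.join(parts[:i])
--             search_dirs.append(dir_name)
--
--     # 最后添加通用的 rules 目录
--     search_dirs.append('rules')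
--
--     return search_dirs
-- ===== SOURCE B (Python) =====
-- from typing import List
--
-- def get_search_directories(slug: str) -> List[str]:
--     """Build the fallback list by truncating one running string from the right."""
--     search_dirs = []
--     if '-' in slug:
--         s = 'rules-' + slug
--         while '-' in s:
--             search_dirs.append(s)
--             s = s.rsplit('-', 1)[0]
--     search_dirs.append('rules')
--     return search_dirs
-- ===== Notes on version B (the rewrite author's own statement) =====
-- stated objective: simpler
-- what changed: Instead of splitting the slug into parts and re-joining each index prefix over a descending range, B keeps one running candidate string (the slug with the directory prefix) and repeatedly truncates it at its last hyphen until no hyphen remains.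
import Mathlib
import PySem

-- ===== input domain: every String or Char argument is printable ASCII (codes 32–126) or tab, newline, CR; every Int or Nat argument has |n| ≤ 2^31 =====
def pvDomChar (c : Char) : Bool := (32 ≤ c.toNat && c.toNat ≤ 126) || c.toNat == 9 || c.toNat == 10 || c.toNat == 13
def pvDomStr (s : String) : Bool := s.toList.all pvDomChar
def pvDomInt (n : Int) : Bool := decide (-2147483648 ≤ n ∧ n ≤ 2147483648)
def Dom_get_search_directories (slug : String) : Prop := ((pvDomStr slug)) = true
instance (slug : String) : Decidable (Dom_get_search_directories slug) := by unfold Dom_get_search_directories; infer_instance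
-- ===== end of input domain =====

-- B differs from A by one decomposition: instead of splitting the slug and re-joining
-- index prefixes, it truncates one running string at its last hyphen; objective: simpler.

-- ===== PORT A =====
def get_search_directories (slug : String) : List String :=
  let search_dirs : List String := []
  let search_dirs :=
    if PySem.Str.isIn "-" slug then
      let parts : List (List Char) := PySem.Chars.splitOn slug.toList "-".toList
      (PySem.List.pyRange (parts.length : Int) 0 (-1)).foldl
        (fun acc i =>
          let dir_name := String.ofList ("rules-".toList ++
            PySem.Chars.join "-".toList (PySem.List.slice parts none (some i)))
          acc ++ [dir_name]) search_dirs
    else search_dirs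
  search_dirs ++ ["rules"]

-- ===== PORT B =====
-- s.rsplit('-', 1)[0]: everything before the LAST '-' (exact when '-' occurs in cs,
-- which is the only way B's loop calls it).
def pvRsplitHead (cs : List Char) : List Char :=
  (((cs.reverse.dropWhile (· ≠ '-')).drop 1)).reverse

theorem pvRsplitHead_lt (cs : List Char) (h : '-' ∈ cs) :
    (pvRsplitHead cs).length < cs.length := by
  unfold pvRsplitHead
  have hne : cs.reverse.dropWhile (· ≠ '-') ≠ [] := by
    intro hnil
    have := List.dropWhile_eq_nil_iff.mp hnil '-' (by simpa using h)
    simp at this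
  have h1 : (cs.reverse.dropWhile (· ≠ '-')).length ≤ cs.length := by
    simpa using List.length_dropWhile_le (p := (· ≠ '-')) (l := cs.reverse)
  have h2 : 0 < (cs.reverse.dropWhile (· ≠ '-')).length := List.length_pos_iff.mpr hne
  simp only [List.length_reverse, List.length_drop]
  omega

-- the while loop of B
def pvLoopB (cs : List Char) (acc : List String) : List String :=
  if h : PySem.Chars.isIn "-".toList cs then
    pvLoopB (pvRsplitHead cs) (acc ++ [String.ofList cs])
  else acc
termination_by cs.length
decreasing_by
  exact pvRsplitHead_lt cs (by
    have := (PySem.Chars.isIn_iff_infix "-".toList cs).mp h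
    exact this.subset (by simp))

def get_search_directories_alt (slug : String) : List String :=
  let search_dirs : List String := []
  let search_dirs :=
    if PySem.Str.isIn "-" slug then
      pvLoopB ("rules-".toList ++ slug.toList) search_dirs
    else search_dirs
  search_dirs ++ ["rules"]

-- ===== PRECONDITION & SPEC =====
def Spec_get_search_directories (slug : String) (out : List String) : Prop := out = get_search_directories_alt slug
instance (slug : String) (out : List String) : Decidable (Spec_get_search_directories slug out) := by unfold Spec_get_search_directories; infer_instance

-- ===== CLAIM (what is proved, stated in full; the proofs are below) =====
def Claim_equal_get_search_directories : Prop := ∀ (slug : String), Dom_get_search_directories slug → Spec_get_search_directories slug (get_search_directories slug)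

-- ===== LEMMAS AND PROOFS =====

-- simple structural version of str.split('-') used only in the proofs
def pvMapHd (f : List Char → List Char) : List (List Char) → List (List Char)
  | [] => []
  | x :: xs => f x :: xs

def pvSplitD : List Char → List (List Char)
  | [] => [[]]
  | c :: r => if c = '-' then [] :: pvSplitD r else pvMapHd (c :: ·) (pvSplitD r)

theorem pvSplitD_ne_nil (l : List Char) : pvSplitD l ≠ [] := by
  induction l with
  | nil => simp [pvSplitD]
  | cons c r ih =>
    simp only [pvSplitD]
    split
    · simp
    · cases h : pvSplitD r with
      | nil => exact absurd h ih
      | cons x xs => simp [pvMapHd]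

theorem pvGo_eq (fuel : Nat) : ∀ (l cur : List Char) (acc : List (List Char)),
    l.length < fuel →
    PySem.Chars.splitOn.go "-".toList fuel l cur acc
      = acc.reverse ++ pvMapHd (cur.reverse ++ ·) (pvSplitD l) := by
  induction fuel with
  | zero => intro l cur acc h; omega
  | succ f ih =>
    intro l cur acc h
    cases l with
    | nil =>
      simp [PySem.Chars.splitOn.go, pvSplitD, pvMapHd]
    | cons c rest =>
      by_cases hc : c = '-'
      · subst hc
        have hpre : "-".toList.isPrefixOf ('-' :: rest) = true := by
          simp [List.isPrefixOf]
        rw [PySem.Chars.splitOn.go]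
        simp only [hpre, if_true]
        have hr : rest.length < f := by simp at h; omega
        rw [show (List.drop "-".toList.length ('-' :: rest)) = rest by simp]
        rw [ih rest [] (cur.reverse :: acc) hr]
        cases hsp : pvSplitD rest with
        | nil => exact absurd hsp (pvSplitD_ne_nil rest)
        | cons x xs => simp [pvSplitD, hsp, pvMapHd]
      · have hpre : "-".toList.isPrefixOf (c :: rest) = false := by
          simp [List.isPrefixOf]
          intro h'; exact hc h'.symm
        rw [PySem.Chars.splitOn.go]
        simp only [hpre]
        have hr : rest.length < f := by simp at h; omega
        rw [if_neg (by simp [hpre])]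
        rw [ih rest (c :: cur) acc hr]
        congr 1
        cases hsp : pvSplitD rest with
        | nil => exact absurd hsp (pvSplitD_ne_nil rest)
        | cons x xs =>
          simp [pvSplitD, hc, hsp, pvMapHd]

theorem pvSplitOn_eq (l : List Char) :
    PySem.Chars.splitOn l "-".toList = pvSplitD l := by
  unfold PySem.Chars.splitOn
  rw [pvGo_eq (l.length + 1) l [] [] (by omega)]
  cases hsp : pvSplitD l with
  | nil => exact absurd hsp (pvSplitD_ne_nil l)
  | cons x xs => simp [pvMapHd]

theorem pvSplitD_no_dash (l : List Char) : ∀ p ∈ pvSplitD l, '-' ∉ p := by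
  induction l with
  | nil => simp [pvSplitD]
  | cons c r ih =>
    simp only [pvSplitD]
    split
    · intro p hp
      rcases List.mem_cons.mp hp with h | h
      · simp [h]
      · exact ih p h
    · rename_i hc
      cases hsp : pvSplitD r with
      | nil => exact absurd hsp (pvSplitD_ne_nil r)
      | cons x xs =>
        intro p hp
        rcases List.mem_cons.mp hp with h | h
        · subst h
          intro hmem
          rcases List.mem_cons.mp hmem with h' | h'
          · exact hc h'.symm
          · exact ih x (by rw [hsp]; simp) h'
        · exact ih p (by rw [hsp]; simp [h])

theorem pvJoin_splitD (l : List Char) :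
    PySem.Chars.join "-".toList (pvSplitD l) = l := by
  induction l with
  | nil => simp [pvSplitD, PySem.Chars.join_singleton]
  | cons c r ih =>
    simp only [pvSplitD]
    split
    · rename_i hc
      subst hc
      cases hsp : pvSplitD r with
      | nil => exact absurd hsp (pvSplitD_ne_nil r)
      | cons x xs =>
        rw [hsp] at ih
        rw [PySem.Chars.join_cons_cons, ih]
        simp
    · rename_i hc
      cases hsp : pvSplitD r with
      | nil => exact absurd hsp (pvSplitD_ne_nil r)
      | cons x xs =>
        rw [hsp] at ih
        cases xs with
        | nil =>
          simp only [pvMapHd, PySem.Chars.join_singleton]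
          rw [PySem.Chars.join_singleton] at ih
          simp [ih]
        | cons y ys =>
          simp only [pvMapHd]
          rw [PySem.Chars.join_cons_cons] at ih ⊢
          rw [← ih]
          simp

-- the running string after k parts remain
def pvS (ps : List (List Char)) (k : Nat) : List Char :=
  "rules-".toList ++ PySem.Chars.join "-".toList (ps.take k)

-- the strings B emits while k parts remain, newest first
def pvEmit (ps : List (List Char)) : Nat → List String
  | 0 => []
  | k + 1 => String.ofList (pvS ps (k + 1)) :: pvEmit ps k

theorem pvIsIn_of_append (a b : List Char) :
    PySem.Chars.isIn "-".toList (a ++ '-' :: b) = true := by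
  rw [PySem.Chars.isIn_iff_infix]
  exact ⟨a, b, by simp⟩

theorem pvRsplitHead_append (a b : List Char) (hb : '-' ∉ b) :
    pvRsplitHead (a ++ '-' :: b) = a := by
  unfold pvRsplitHead
  have h1 : b.reverse.dropWhile (· ≠ '-') = [] := by
    rw [List.dropWhile_eq_nil_iff]
    intro x hx
    simp only [ne_eq, decide_eq_true_eq]
    intro hEq; subst hEq; exact hb (List.mem_reverse.mp hx)
  rw [show (a ++ '-' :: b).reverse = b.reverse ++ '-' :: a.reverse by simp]
  rw [List.dropWhile_append, h1]
  simp

theorem pvJoin_append_singleton (xs : List (List Char)) (y : List Char) (h : xs ≠ []) :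
    PySem.Chars.join "-".toList (xs ++ [y])
      = PySem.Chars.join "-".toList xs ++ '-' :: y := by
  induction xs with
  | nil => exact absurd rfl h
  | cons x xs ih =>
    cases xs with
    | nil =>
      rw [show ([x] ++ [y]) = [x, y] from rfl, PySem.Chars.join_cons_cons,
        PySem.Chars.join_singleton, PySem.Chars.join_singleton]
      simp
    | cons z zs =>
      rw [show ((x :: z :: zs) ++ [y]) = x :: (z :: (zs ++ [y])) by simp,
        PySem.Chars.join_cons_cons,
        show (z :: (zs ++ [y])) = ((z :: zs) ++ [y]) by simp,
        ih (by simp), PySem.Chars.join_cons_cons]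
      simp

theorem pvJoin_take_succ (ps : List (List Char)) (k : Nat) (h1 : 1 ≤ k)
    (h2 : k + 1 ≤ ps.length) :
    PySem.Chars.join "-".toList (ps.take (k + 1))
      = PySem.Chars.join "-".toList (ps.take k) ++ '-' :: ps[k] := by
  have htk : ps.take (k + 1) = ps.take k ++ [ps[k]] := by
    rw [List.take_succ]
    simp [List.getElem?_eq_getElem (by omega : k < ps.length)]
  rw [htk]
  have hne : ps.take k ≠ [] := by
    intro h
    have hl : (ps.take k).length = 0 := by rw [h]; rfl
    rw [List.length_take] at hl
    omega
  exact pvJoin_append_singleton (ps.take k) ps[k] hne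

theorem pvLoopB_rules (acc : List String) :
    pvLoopB "rules".toList acc = acc := by
  rw [pvLoopB, dif_neg (by decide)]

theorem pvLoopB_run (ps : List (List Char)) (hps : ∀ p ∈ ps, '-' ∉ p) :
    ∀ k, k + 1 ≤ ps.length → ∀ acc,
      pvLoopB (pvS ps (k + 1)) acc = acc ++ pvEmit ps (k + 1) := by
  intro k
  induction k with
  | zero =>
    intro hk acc
    have h0 : ps.take 1 = [ps[0]] := by
      cases ps with
      | nil => simp at hk
      | cons x xs => simp
    have hS : pvS ps 1 = "rules".toList ++ '-' :: ps[0] := by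
      unfold pvS
      rw [h0, PySem.Chars.join_singleton]
      rfl
    have hstep : pvRsplitHead (pvS ps 1) = "rules".toList := by
      rw [hS]; exact pvRsplitHead_append _ _ (hps ps[0] (List.getElem_mem _))
    rw [pvLoopB, dif_pos (by rw [hS]; exact pvIsIn_of_append _ _), hstep, pvLoopB_rules]
    simp [pvEmit]
  | succ k ih =>
    intro hk acc
    have hS : pvS ps (k + 2) = pvS ps (k + 1) ++ '-' :: ps[k + 1] := by
      unfold pvS
      rw [pvJoin_take_succ ps (k + 1) (by omega) (by omega)]
      simp
    have hstep : pvRsplitHead (pvS ps (k + 2)) = pvS ps (k + 1) := by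
      rw [hS]; exact pvRsplitHead_append _ _ (hps ps[k + 1] (List.getElem_mem _))
    rw [pvLoopB, dif_pos (by rw [hS]; exact pvIsIn_of_append _ _), hstep]
    rw [ih (by omega)]
    simp [pvEmit]

-- A's loop equals the same emitted list
theorem pvFoldA (ps : List (List Char)) :
    ∀ m, m ≤ ps.length → ∀ acc0 : List String,
      (PySem.List.pyRange (m : Int) 0 (-1)).foldl
        (fun acc i => acc ++ [String.ofList ("rules-".toList ++
          PySem.Chars.join "-".toList (PySem.List.slice ps none (some i)))]) acc0
        = acc0 ++ pvEmit ps m := by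
  intro m
  induction m with
  | zero =>
    intro _ acc0
    rw [PySem.List.pyRange_neg_one_eq_nil (by omega)]
    simp [pvEmit]
  | succ m ih =>
    intro hm acc0
    rw [PySem.List.pyRange_neg_one_cons (by exact_mod_cast Nat.succ_pos m)]
    simp only [List.foldl_cons]
    rw [show (((m + 1 : Nat) : Int) - 1) = (m : Int) by push_cast; ring]
    have hsl : PySem.List.slice ps none (some ((m + 1 : Nat) : Int)) = ps.take (m + 1) := by
      rw [PySem.List.slice_to ps (by positivity)]
      simp
    rw [hsl]
    rw [ih (by omega)]
    simp [pvEmit, pvS]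

theorem pvSplitD_len_pos (l : List Char) : 1 ≤ (pvSplitD l).length := by
  have := pvSplitD_ne_nil l
  cases h : pvSplitD l with
  | nil => exact absurd h this
  | cons x xs => simp

-- ===== VERDICT (by name: the statement is the Claim_ definition above) =====
theorem get_search_directories_spec : Claim_equal_get_search_directories := by
  intro slug _
  unfold Spec_get_search_directories get_search_directories get_search_directories_alt
  by_cases h : PySem.Str.isIn "-" slug
  · simp only [h, if_true]
    set ps := PySem.Chars.splitOn slug.toList "-".toList with hps
    have hsp : ps = pvSplitD slug.toList := pvSplitOn_eq slug.toList
    have hnodash : ∀ p ∈ ps, '-' ∉ p := by rw [hsp]; exact pvSplitD_no_dash slug.toList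
    have hlen : 1 ≤ ps.length := by rw [hsp]; exact pvSplitD_len_pos slug.toList
    have hjoin : PySem.Chars.join "-".toList ps = slug.toList := by
      rw [hsp]; exact pvJoin_splitD slug.toList
    rw [pvFoldA ps ps.length (le_refl _) []]
    have hfull : ps.take ps.length = ps := List.take_length
    obtain ⟨k, hk⟩ : ∃ k, ps.length = k + 1 := ⟨ps.length - 1, by omega⟩
    have hB : "rules-".toList ++ slug.toList = pvS ps ps.length := by
      unfold pvS
      rw [hfull, hjoin]
    rw [hB, hk]
    rw [pvLoopB_run ps hnodash k (by omega) []]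
  · have h' : PySem.Chars.isIn ['-'] slug.toList = false := by
      simpa [PySem.Str.isIn] using h
    simp [h']
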